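-- pv_equiv track=rewrite | github.com/scottonanski/persistent-mind-model-v1.0 | pmm/utils/parsers.py | parse_commitment_refs
-- ===== SOURCE A (Python) =====
-- def parse_commitment_refs(text: str) -> list[str]:
--     """
--     Extract commitment references in format "123:abc12345" or "CID abc12345".
--
--     Args:
--         text: Input text to scan
--
--     Returns:
--         List of commitment IDs (CIDs) found
--     """
--     if not text:
--         return []
--
--     cids: set[str] = set()
--     tokens = text.split()
--
--     for i, token in enumerate(tokens):
--         # Pattern: "123:abc12345" (event_id:cid_prefix)
--         if ":" in token:
--             parts = token.split(":")
--             if len(parts) == 2: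
--                 event_part, cid_part = parts
--                 # Validate: event_part is 2-5 digits, cid_part is hex
--                 if (
--                     event_part.isdigit()
--                     and 2 <= len(event_part) <= 5
--                     and _is_hex_string(cid_part)
--                     and len(cid_part) >= 8
--                 ):
--                     cids.add(cid_part)
--
--         # Pattern: "CID abc12345"
--         token_upper = token.upper()
--         if token_upper == "CID" and i + 1 < len(tokens):
--             next_token = tokens[i + 1]
--             if _is_hex_string(next_token) and len(next_token) >= 8:
--                 cids.add(next_token)
--
--     return sorted(cids)
--
-- def _is_hex_string(s: str) -> bool:
--     """Check if string contains only hexadecimal characters."""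
--     if not s:
--         return False
--
--     for char in s.lower():
--         if char not in "0123456789abcdef":
--             return False
--
--     return True
-- ===== SOURCE B (Python) =====
-- def parse_commitment_refs(text: str) -> list[str]:
--     """Extract commitment CIDs with a single character-level scan.
--
--     Instead of splitting into tokens and validating each token, walk the text
--     once, maintaining running flags for the current word (digit prefix, first
--     colon, hex-ness); flush a candidate CID at every word boundary.
--     """
--     HEX = "0123456789abcdefABCDEF"
--     cids: set[str] = set()
--     word: list[str] = []          # characters of the current word
--     cid = None                    # chars after the first ':' (None = no ':' yet)
--     pre_len = 0                   # number of characters before the first ':'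
--     digits_ok = True              # every char before the first ':' is a digit
--     hex_ok = True                 # every char of the word is hex
--     tail_ok = True                # no second ':' and all-hex after the ':'
--     prev_cid = False              # previous word was "CID" (case-insensitive)
--     for c in text + " ":
--         if c.isspace():
--             if word:
--                 if cid is not None and digits_ok and 2 <= pre_len <= 5 \
--                         and tail_ok and len(cid) >= 8:
--                     cids.add("".join(cid))
--                 if prev_cid and hex_ok and len(word) >= 8:
--                     cids.add("".join(word))
--                 prev_cid = "".join(word).upper() == "CID"
--                 word, cid, pre_len = [], None, 0
--                 digits_ok = hex_ok = tail_ok = True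
--             continue
--         word.append(c)
--         if c not in HEX:
--             hex_ok = False
--         if cid is None:
--             if c == ":":
--                 cid = []
--             else:
--                 pre_len += 1
--                 if not c.isdigit():
--                     digits_ok = False
--         elif c == ":":
--             tail_ok = False
--         else:
--             cid.append(c)
--             if c not in HEX:
--                 tail_ok = False
--     return sorted(cids)
-- ===== Notes on version B (the rewrite author's own statement) =====
-- stated objective: alternative
-- what changed: Replaces tokenize-then-validate (split into a token list, enumerate with next-token lookahead, per-token re-splitting and digit/hex helper checks) by a single character-level scanner over the raw text that maintains running per-word flags (digit-prefix length, first-colon state, hex-ness) and flushes candidate CIDs at each whitespace boundary; no token list is ever built. B trades interpreter speed for a one-pass streaming structure.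
import Mathlib
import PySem

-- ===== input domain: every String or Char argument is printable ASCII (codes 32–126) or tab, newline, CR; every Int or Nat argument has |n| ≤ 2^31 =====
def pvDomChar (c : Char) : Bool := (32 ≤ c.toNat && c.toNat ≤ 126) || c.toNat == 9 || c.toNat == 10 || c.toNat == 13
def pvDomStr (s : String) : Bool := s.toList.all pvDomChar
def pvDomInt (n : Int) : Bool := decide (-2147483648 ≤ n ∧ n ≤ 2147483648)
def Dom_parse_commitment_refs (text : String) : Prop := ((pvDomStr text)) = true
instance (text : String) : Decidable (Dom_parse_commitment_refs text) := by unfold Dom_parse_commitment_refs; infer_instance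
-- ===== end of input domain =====

-- B replaces A's tokenize-then-validate design (a token list, enumerate with next-token
-- lookahead, per-token re-splitting and digit/hex helper checks) by a single character-level
-- scanner over the raw text that keeps running per-word flags and flushes candidate CIDs at
-- whitespace boundaries (objective: alternative).

-- ===== PORT A =====
-- _is_hex_string; Python's `char in "0123456789abcdef"` is membership among the literal's characters (1-char needle)
def pv_is_hex_string (s : String) : Bool :=
  if s = "" then false
  else (PySem.Chars.lower s.toList).all (fun c => "0123456789abcdef".toList.contains c)

def parse_commitment_refs (text : String) : List String :=
  if text = "" then []
  else
    let tokens := PySem.Str.split₀ text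
    let cids : PySem.Set String :=
      (PySem.List.enumerate tokens).foldl (fun cids it =>
        let i := it.1
        let token := it.2
        let cids :=
          if PySem.Str.isIn ":" token then
            let parts := (PySem.Str.split? token ":").getD []
            if parts.length = 2 then
              match parts with
              | [event_part, cid_part] =>
                if PySem.Str.strIsdigit event_part
                    && decide ((2 : Int) ≤ PySem.Str.len event_part)
                    && decide (PySem.Str.len event_part ≤ 5)
                    && pv_is_hex_string cid_part
                    && decide ((8 : Int) ≤ PySem.Str.len cid_part)
                then PySem.Set.add cids cid_part
                else cids
              | _ => cids
            else cids
          else cids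
        let token_upper := PySem.Str.upper token
        if token_upper = "CID" && decide (i + 1 < (tokens.length : Int)) then
          let next_token := PySem.List.pyGetD tokens (i + 1) ""
          if pv_is_hex_string next_token && decide ((8 : Int) ≤ PySem.Str.len next_token)
          then PySem.Set.add cids next_token
          else cids
        else cids) (PySem.Set.empty)
    PySem.List.sorted cids (fun x => x)

-- ===== PORT B =====
-- `c in HEX` over the literal HEX string
def pvHexChar (c : Char) : Bool := "0123456789abcdefABCDEF".toList.contains c

-- the scanner's mutable locals, as one state record
structure PvB where
  cids : PySem.Set String
  word : List Char            -- characters of the current word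
  cid : Option (List Char)    -- chars after the first ':' (none = no ':' yet)
  preLen : Int                -- number of characters before the first ':'
  digitsOk : Bool             -- every char before the first ':' is a digit
  hexOk : Bool                -- every char of the word is hex
  tailOk : Bool               -- no second ':' and all-hex after the ':'
  prevCid : Bool              -- previous word was "CID" (case-insensitive)
  deriving Repr

-- the body of `for c in text + " "`
def pvBStep (st : PvB) (c : Char) : PvB :=
  if PySem.Chars.isspace c then
    if st.word.isEmpty then st
    else
      let cids :=
        match st.cid with
        | some t =>
          if st.digitsOk && decide ((2 : Int) ≤ st.preLen) && decide (st.preLen ≤ 5)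
              && st.tailOk && decide ((8 : Int) ≤ (t.length : Int))
          then PySem.Set.add st.cids (String.ofList t)
          else st.cids
        | none => st.cids
      let cids :=
        if st.prevCid && st.hexOk && decide ((8 : Int) ≤ (st.word.length : Int))
        then PySem.Set.add cids (String.ofList st.word)
        else cids
      ⟨cids, [], none, 0, true, true, true,
        decide (PySem.Str.upper (String.ofList st.word) = "CID")⟩
  else
    let word := st.word ++ [c]
    let hexOk := st.hexOk && pvHexChar c
    match st.cid with
    | none =>
      if c = ':' then ⟨st.cids, word, some [], st.preLen, st.digitsOk, hexOk, st.tailOk, st.prevCid⟩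
      else ⟨st.cids, word, none, st.preLen + 1,
            st.digitsOk && PySem.Chars.isdigit c, hexOk, st.tailOk, st.prevCid⟩
    | some t =>
      if c = ':' then ⟨st.cids, word, some t, st.preLen, st.digitsOk, hexOk, false, st.prevCid⟩
      else ⟨st.cids, word, some (t ++ [c]), st.preLen, st.digitsOk, hexOk,
            st.tailOk && pvHexChar c, st.prevCid⟩

def parse_commitment_refs_alt (text : String) : List String :=
  let init : PvB := ⟨PySem.Set.empty, [], none, 0, true, true, true, false⟩
  let fin := (text.toList ++ [' ']).foldl pvBStep init
  PySem.List.sorted fin.cids (fun x => x)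

-- ===== PRECONDITION & SPEC =====
def Spec_parse_commitment_refs (text : String) (out : List String) : Prop := out = parse_commitment_refs_alt text
instance (text : String) (out : List String) : Decidable (Spec_parse_commitment_refs text out) := by unfold Spec_parse_commitment_refs; infer_instance

-- ===== CLAIM (what is proved, stated in full; the proofs are below) =====
def Claim_equal_parse_commitment_refs : Prop := ∀ (text : String), Dom_parse_commitment_refs text → Spec_parse_commitment_refs text (parse_commitment_refs text)

-- ===== LEMMAS AND PROOFS =====

-- ## A-side: per-token characterisation of A's fold

def pvColonA (t : String) : Option String :=
  if PySem.Str.isIn ":" t then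
    let parts := (PySem.Str.split? t ":").getD []
    if parts.length = 2 then
      match parts with
      | [event_part, cid_part] =>
        if PySem.Str.strIsdigit event_part
            && decide ((2 : Int) ≤ PySem.Str.len event_part)
            && decide (PySem.Str.len event_part ≤ 5)
            && pv_is_hex_string cid_part
            && decide ((8 : Int) ≤ PySem.Str.len cid_part)
        then some cid_part else none
      | _ => none
    else none
  else none

def pvPairA (p : String × String) : Option String :=
  if PySem.Str.upper p.1 = "CID" && (pv_is_hex_string p.2 && decide ((8 : Int) ≤ PySem.Str.len p.2))
  then some p.2 else none

def pvColonAdd (cids : PySem.Set String) (t : String) : PySem.Set String :=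
  match pvColonA t with
  | some c => PySem.Set.add cids c
  | none => cids

def pvStepA (cids : PySem.Set String) (t : String) (next? : Option String) : PySem.Set String :=
  match next? with
  | some nt =>
    if PySem.Str.upper t = "CID" && (pv_is_hex_string nt && decide ((8 : Int) ≤ PySem.Str.len nt))
    then PySem.Set.add (pvColonAdd cids t) nt
    else pvColonAdd cids t
  | none => pvColonAdd cids t

def pvPairFold : PySem.Set String → List String → PySem.Set String
  | cids, [] => cids
  | cids, t :: rest => pvPairFold (pvStepA cids t rest.head?) rest

lemma pvMatchColon (cids : PySem.Set String) (l : List String)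
    (cond : String → String → Bool) :
    (if l.length = 2 then
       match l with
       | [e, c] => if cond e c then PySem.Set.add cids c else cids
       | _ => cids
     else cids)
    = (match (if l.length = 2 then
         match l with
         | [e, c] => if cond e c then some c else none
         | _ => none
       else none) with
       | some c => PySem.Set.add cids c
       | none => cids) := by
  match l with
  | [] => simp
  | [a] => simp
  | [a, b] =>
    by_cases hc : cond a b
    · simp [hc]
    · simp [hc]
  | a :: b :: c :: rest => simp

lemma pvBodyColon (cids : PySem.Set String) (t : String) :
    (if PySem.Str.isIn ":" t then
        let parts := (PySem.Str.split? t ":").getD []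
        if parts.length = 2 then
          match parts with
          | [event_part, cid_part] =>
            if PySem.Str.strIsdigit event_part
                && decide ((2 : Int) ≤ PySem.Str.len event_part)
                && decide (PySem.Str.len event_part ≤ 5)
                && pv_is_hex_string cid_part
                && decide ((8 : Int) ≤ PySem.Str.len cid_part)
            then PySem.Set.add cids cid_part
            else cids
          | _ => cids
        else cids
      else cids)
    = pvColonAdd cids t := by
  unfold pvColonAdd pvColonA
  by_cases h : PySem.Str.isIn ":" t
  · rw [if_pos h, if_pos h]
    exact pvMatchColon cids ((PySem.Str.split? t ":").getD [])
      (fun event_part cid_part =>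
        PySem.Str.strIsdigit event_part
          && decide ((2 : Int) ≤ PySem.Str.len event_part)
          && decide (PySem.Str.len event_part ≤ 5)
          && pv_is_hex_string cid_part
          && decide ((8 : Int) ≤ PySem.Str.len cid_part))
  · rw [if_neg h, if_neg h]

lemma pvFoldEq (tokens : List String) (k : Nat) (l : List String) (cids : PySem.Set String)
    (hdrop : tokens.drop k = l) :
    (PySem.List.enumerate l (k : Int)).foldl (fun cids it =>
        let i := it.1
        let token := it.2
        let cids :=
          if PySem.Str.isIn ":" token then
            let parts := (PySem.Str.split? token ":").getD []
            if parts.length = 2 then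
              match parts with
              | [event_part, cid_part] =>
                if PySem.Str.strIsdigit event_part
                    && decide ((2 : Int) ≤ PySem.Str.len event_part)
                    && decide (PySem.Str.len event_part ≤ 5)
                    && pv_is_hex_string cid_part
                    && decide ((8 : Int) ≤ PySem.Str.len cid_part)
                then PySem.Set.add cids cid_part
                else cids
              | _ => cids
            else cids
          else cids
        let token_upper := PySem.Str.upper token
        if token_upper = "CID" && decide (i + 1 < (tokens.length : Int)) then
          let next_token := PySem.List.pyGetD tokens (i + 1) ""
          if pv_is_hex_string next_token && decide ((8 : Int) ≤ PySem.Str.len next_token)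
          then PySem.Set.add cids next_token
          else cids
        else cids) cids
    = pvPairFold cids l := by
  induction l generalizing k cids with
  | nil => simp [PySem.List.enumerate_nil, pvPairFold]
  | cons t rest ih =>
    have hkl : k < tokens.length := by
      by_contra hk
      rw [List.drop_eq_nil_of_le (by omega)] at hdrop
      simp at hdrop
    have hlen : tokens.length = k + 1 + rest.length := by
      have h1 := List.length_drop (l := tokens) (i := k)
      rw [hdrop] at h1
      simp at h1
      omega
    have hdrop1 : tokens.drop (k + 1) = rest := by
      have h2 : tokens.drop (k + 1) = (tokens.drop k).drop 1 := by
        rw [List.drop_drop]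
      rw [h2, hdrop]
      rfl
    rw [PySem.List.enumerate_cons, List.foldl_cons]
    have hcast : (k : Int) + 1 = ((k + 1 : Nat) : Int) := by push_cast; ring
    have hbody : ∀ c : PySem.Set String,
        (fun (cids : PySem.Set String) (it : Int × String) =>
          let i := it.1
          let token := it.2
          let cids :=
            if PySem.Str.isIn ":" token then
              let parts := (PySem.Str.split? token ":").getD []
              if parts.length = 2 then
                match parts with
                | [event_part, cid_part] =>
                  if PySem.Str.strIsdigit event_part
                      && decide ((2 : Int) ≤ PySem.Str.len event_part)
                      && decide (PySem.Str.len event_part ≤ 5)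
                      && pv_is_hex_string cid_part
                      && decide ((8 : Int) ≤ PySem.Str.len cid_part)
                  then PySem.Set.add cids cid_part
                  else cids
                | _ => cids
              else cids
            else cids
          let token_upper := PySem.Str.upper token
          if token_upper = "CID" && decide (i + 1 < (tokens.length : Int)) then
            let next_token := PySem.List.pyGetD tokens (i + 1) ""
            if pv_is_hex_string next_token && decide ((8 : Int) ≤ PySem.Str.len next_token)
            then PySem.Set.add cids next_token
            else cids
          else cids) c ((k : Int), t)
        = pvStepA c t rest.head? := by
      intro c
      show (let cids :=
              (if PySem.Str.isIn ":" t then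
                let parts := (PySem.Str.split? t ":").getD []
                if parts.length = 2 then
                  match parts with
                  | [event_part, cid_part] =>
                    if PySem.Str.strIsdigit event_part
                        && decide ((2 : Int) ≤ PySem.Str.len event_part)
                        && decide (PySem.Str.len event_part ≤ 5)
                        && pv_is_hex_string cid_part
                        && decide ((8 : Int) ≤ PySem.Str.len cid_part)
                    then PySem.Set.add c cid_part
                    else c
                  | _ => c
                else c
              else c)
            if PySem.Str.upper t = "CID" && decide ((k : Int) + 1 < (tokens.length : Int)) then
              if pv_is_hex_string (PySem.List.pyGetD tokens ((k : Int) + 1) "")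
                  && decide ((8 : Int) ≤ PySem.Str.len (PySem.List.pyGetD tokens ((k : Int) + 1) ""))
              then PySem.Set.add cids (PySem.List.pyGetD tokens ((k : Int) + 1) "")
              else cids
            else cids)
          = pvStepA c t rest.head?
      rw [pvBodyColon c t]
      unfold pvStepA
      cases rest with
      | nil =>
        have hguard : decide ((k : Int) + 1 < (tokens.length : Int)) = false := by
          simp only [decide_eq_false_iff_not, not_lt]
          simp at hlen
          omega
        rw [hguard]
        simp
      | cons r0 rest' =>
        have hguard : decide ((k : Int) + 1 < (tokens.length : Int)) = true := by
          simp only [decide_eq_true_iff, hlen, List.length_cons]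
          push_cast
          omega
        have hget : PySem.List.pyGetD tokens ((k : Int) + 1) "" = r0 := by
          rw [hcast, PySem.List.pyGetD_natCast]
          have h0 : (tokens.drop (k + 1))[0]? = some r0 := by rw [hdrop1]; rfl
          rw [List.getElem?_drop] at h0
          rw [List.getD_eq_getElem?_getD]
          simp only [Nat.add_zero] at h0
          rw [h0]
          rfl
        rw [hguard, hget]
        simp only [Bool.and_true, List.head?_cons]
        by_cases hu : PySem.Str.upper t = "CID"
        · simp only [hu, decide_true, Bool.true_and]
          rfl
        · simp only [decide_eq_false hu, Bool.false_and]
          simp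
    rw [hcast, ih (k + 1) ((fun (cids : PySem.Set String) (it : Int × String) =>
          let i := it.1
          let token := it.2
          let cids :=
            if PySem.Str.isIn ":" token then
              let parts := (PySem.Str.split? token ":").getD []
              if parts.length = 2 then
                match parts with
                | [event_part, cid_part] =>
                  if PySem.Str.strIsdigit event_part
                      && decide ((2 : Int) ≤ PySem.Str.len event_part)
                      && decide (PySem.Str.len event_part ≤ 5)
                      && pv_is_hex_string cid_part
                      && decide ((8 : Int) ≤ PySem.Str.len cid_part)
                  then PySem.Set.add cids cid_part
                  else cids
                | _ => cids
              else cids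
            else cids
          let token_upper := PySem.Str.upper token
          if token_upper = "CID" && decide (i + 1 < (tokens.length : Int)) then
            let next_token := PySem.List.pyGetD tokens (i + 1) ""
            if pv_is_hex_string next_token && decide ((8 : Int) ≤ PySem.Str.len next_token)
            then PySem.Set.add cids next_token
            else cids
          else cids) cids ((k : Int), t)) hdrop1, hbody cids]
    rfl


lemma pvMemColonAdd (cids : PySem.Set String) (t : String) (x : String) :
    x ∈ pvColonAdd cids t ↔ x ∈ cids ∨ pvColonA t = some x := by
  unfold pvColonAdd
  cases hc : pvColonA t with
  | none => simp
  | some c =>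
    rw [PySem.Set.mem_add]
    simp only [Option.some_inj]
    exact or_congr Iff.rfl ⟨fun h => h.symm, fun h => h.symm⟩

lemma pvMemStepA (cids : PySem.Set String) (t : String) (next? : Option String) (x : String) :
    x ∈ pvStepA cids t next? ↔ x ∈ cids ∨ pvColonA t = some x ∨
      (∃ nt, next? = some nt ∧ pvPairA (t, nt) = some x) := by
  cases next? with
  | none =>
    show x ∈ pvColonAdd cids t ↔ _
    rw [pvMemColonAdd]
    simp
  | some nt =>
    have hpair : pvPairA (t, nt) =
        (if PySem.Str.upper t = "CID" && (pv_is_hex_string nt && decide ((8 : Int) ≤ PySem.Str.len nt)) then some nt else none) := rfl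
    show x ∈ (if PySem.Str.upper t = "CID" && (pv_is_hex_string nt && decide ((8 : Int) ≤ PySem.Str.len nt)) then PySem.Set.add (pvColonAdd cids t) nt else pvColonAdd cids t) ↔ _
    by_cases hcond : (PySem.Str.upper t = "CID" && (pv_is_hex_string nt && decide ((8 : Int) ≤ PySem.Str.len nt))) = true
    · rw [if_pos hcond, PySem.Set.mem_add, pvMemColonAdd]
      constructor
      · rintro ((h | h) | h)
        · exact Or.inl h
        · exact Or.inr (Or.inl h)
        · exact Or.inr (Or.inr ⟨nt, rfl, by rw [hpair, if_pos hcond, h]⟩)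
      · rintro (h | h | ⟨nt2, hnt, hp⟩)
        · exact Or.inl (Or.inl h)
        · exact Or.inl (Or.inr h)
        · rw [Option.some_inj] at hnt
          subst hnt
          rw [hpair, if_pos hcond, Option.some_inj] at hp
          exact Or.inr hp.symm
    · rw [Bool.not_eq_true] at hcond
      rw [hcond]
      simp only [Bool.false_eq_true, if_false, pvMemColonAdd]
      constructor
      · rintro (h | h)
        · exact Or.inl h
        · exact Or.inr (Or.inl h)
      · rintro (h | h | ⟨nt2, hnt, hp⟩)
        · exact Or.inl h
        · exact Or.inr h
        · rw [Option.some_inj] at hnt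
          subst hnt
          rw [hpair, hcond] at hp
          simp at hp


lemma pvMemPairFold (l : List String) : ∀ (cids : PySem.Set String) (x : String),
    x ∈ pvPairFold cids l ↔ x ∈ cids ∨ (∃ t ∈ l, pvColonA t = some x) ∨
      (∃ p ∈ l.zip l.tail, pvPairA p = some x) := by
  induction l with
  | nil => intro cids x; simp [pvPairFold]
  | cons t rest ih =>
    intro cids x
    show x ∈ pvPairFold (pvStepA cids t rest.head?) rest ↔ _
    rw [ih, pvMemStepA]
    cases rest with
    | nil => simp
    | cons r0 rest' =>
      simp only [List.head?_cons, List.mem_cons, List.zip_cons_cons, List.tail_cons]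
      constructor
      · rintro ((h | h | ⟨nt, hnt, hp⟩) | ⟨t', ht', hc⟩ | ⟨p, hp1, hp2⟩)
        · exact Or.inl h
        · exact Or.inr (Or.inl ⟨t, Or.inl rfl, h⟩)
        · obtain rfl : r0 = nt := by injection hnt
          exact Or.inr (Or.inr ⟨(t, r0), Or.inl rfl, hp⟩)
        · exact Or.inr (Or.inl ⟨t', Or.inr ht', hc⟩)
        · exact Or.inr (Or.inr ⟨p, Or.inr hp1, hp2⟩)
      · rintro (h | ⟨t', ht' | ht', hc⟩ | ⟨p, hp1 | hp1, hp2⟩)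
        · exact Or.inl (Or.inl h)
        · exact Or.inl (Or.inr (Or.inl (ht' ▸ hc)))
        · exact Or.inr (Or.inl ⟨t', ht', hc⟩)
        · exact Or.inl (Or.inr (Or.inr ⟨r0, rfl, hp1 ▸ hp2⟩))
        · exact Or.inr (Or.inr ⟨p, hp1, hp2⟩)


lemma pvNodupPairFold (l : List String) : ∀ (cids : PySem.Set String),
    cids.Nodup → (pvPairFold cids l).Nodup := by
  induction l with
  | nil => intro cids h; exact h
  | cons t rest ih =>
    intro cids h
    show (pvPairFold (pvStepA cids t rest.head?) rest).Nodup
    apply ih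
    have hca : (pvColonAdd cids t).Nodup := by
      unfold pvColonAdd
      cases pvColonA t with
      | none => exact h
      | some c => exact PySem.Set.nodup_add _ _ h
    cases rest.head? with
    | none => exact hca
    | some nt =>
      show List.Nodup (if _ then PySem.Set.add (pvColonAdd cids t) nt else pvColonAdd cids t)
      split_ifs with hc
      · exact PySem.Set.nodup_add _ _ hca
      · exact hca


-- ## split(":") characterisation (first-colon decomposition)

def pvSplit1 : List Char → List (List Char)
  | [] => [[]]
  | c :: cs =>
    if c = ':' then [] :: pvSplit1 cs
    else
      match pvSplit1 cs with
      | [] => [[c]]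
      | h :: t => (c :: h) :: t

lemma pvSplit1_ne_nil (l : List Char) : pvSplit1 l ≠ [] := by
  cases l with
  | nil => simp [pvSplit1]
  | cons c cs =>
    simp only [pvSplit1]
    split_ifs
    · simp
    · cases h : pvSplit1 cs <;> simp


lemma pvGoSplit (fuel : Nat) : ∀ (l cur : List Char) (acc : List (List Char)), l.length < fuel →
    PySem.Chars.splitOn.go [':'] fuel l cur acc =
      acc.reverse ++ (match pvSplit1 l with
        | [] => []
        | h :: t => (cur.reverse ++ h) :: t) := by
  induction fuel with
  | zero => intro l cur acc h; omega
  | succ n ih =>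
    intro l cur acc h
    cases l with
    | nil =>
      simp [PySem.Chars.splitOn.go, pvSplit1]
    | cons c rest =>
      rw [PySem.Chars.splitOn.go]
      by_cases hc : c = ':'
      · subst hc
        simp only [List.isPrefixOf, BEq.rfl, Bool.and_true, if_pos]
        rw [ih _ _ _ (by simpa using Nat.lt_of_succ_lt_succ h)]
        simp only [pvSplit1]
        cases hr : pvSplit1 rest with
        | nil => exact absurd hr (pvSplit1_ne_nil rest)
        | cons h0 t0 => simp [hr]
      · have : List.isPrefixOf [':'] (c :: rest) = false := by
          simp [List.isPrefixOf]; exact fun hh => (hc hh.symm).elim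
        rw [this]
        simp only [Bool.false_eq_true, if_false]
        rw [ih _ _ _ (by simpa using Nat.lt_of_succ_lt_succ h)]
        simp only [pvSplit1, if_neg hc]
        cases hr : pvSplit1 rest with
        | nil => exact absurd hr (pvSplit1_ne_nil rest)
        | cons h0 t0 => simp

lemma pvSplitOn_eq (l : List Char) : PySem.Chars.splitOn l [':'] = pvSplit1 l := by
  unfold PySem.Chars.splitOn
  rw [pvGoSplit (l.length + 1) l [] [] (by omega)]
  cases hr : pvSplit1 l with
  | nil => exact absurd hr (pvSplit1_ne_nil l)
  | cons h t => simp


lemma pvSplit1_no_colon (l : List Char) (h : ':' ∉ l) : pvSplit1 l = [l] := by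
  induction l with
  | nil => rfl
  | cons c cs ih =>
    have hc : ¬ c = ':' := fun hh => h (hh ▸ List.mem_cons_self)
    simp only [pvSplit1, if_neg hc, ih (fun hm => h (List.mem_cons_of_mem _ hm))]


lemma pvSplit1_append (e r : List Char) (h : ':' ∉ e) :
    pvSplit1 (e ++ ':' :: r) = e :: pvSplit1 r := by
  induction e with
  | nil => simp [pvSplit1]
  | cons c cs ih =>
    have hc : ¬ c = ':' := fun hh => h (hh ▸ List.mem_cons_self)
    simp only [List.cons_append, pvSplit1, if_neg hc,
      ih (fun hm => h (List.mem_cons_of_mem _ hm))]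


lemma pvSplit1_two_of_mem (l : List Char) (h : ':' ∈ l) : 2 ≤ (pvSplit1 l).length := by
  induction l with
  | nil => simp at h
  | cons c cs ih =>
    by_cases hc : c = ':'
    · simp only [pvSplit1, if_pos hc, List.length_cons]
      have := List.length_pos_iff.mpr (pvSplit1_ne_nil cs)
      omega
    · have hm : ':' ∈ cs := by
        rcases List.mem_cons.mp h with h1 | h1
        · exact absurd h1.symm hc
        · exact h1
      simp only [pvSplit1, if_neg hc]
      cases hr : pvSplit1 cs with
      | nil => exact absurd hr (pvSplit1_ne_nil cs)
      | cons h0 t0 => have := ih hm; rw [hr] at this; simpa using this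


lemma pvSingleton_infix (a : Char) (l : List Char) : [a] <:+: l ↔ a ∈ l := by
  constructor
  · intro h; simpa using h.sublist.subset (List.mem_cons_self)
  · intro h
    rcases List.append_of_mem h with ⟨s, t, rfl⟩
    exact ⟨s, t, by simp⟩


lemma pvIsInColon (s : String) : (PySem.Str.isIn ":" s = true) ↔ ':' ∈ s.toList := by
  rw [PySem.Str.isIn_iff_infix]
  exact pvSingleton_infix ':' s.toList


lemma pvStrLen_ofList (l : List Char) : PySem.Str.len (String.ofList l) = (l.length : Int) := by
  unfold PySem.Str.len
  rw [String.toList_ofList]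


lemma pvEqChar (d c : Char) (h : d.toNat = c.toNat) : d = c := by
  have := congrArg Char.ofNat h
  rwa [Char.ofNat_toNat, Char.ofNat_toNat] at this

lemma pvMemOfToNat (lst : List Char) (d : Char) : d ∈ lst ↔ d.toNat ∈ lst.map Char.toNat := by
  constructor
  · exact fun h => List.mem_map_of_mem h
  · intro h
    rcases List.mem_map.mp h with ⟨x, hx, he⟩
    exact (pvEqChar d x he.symm) ▸ hx

lemma pvMemHexL (d : Char) : d ∈ "0123456789abcdef".toList ↔
    (48 ≤ d.toNat ∧ d.toNat ≤ 57) ∨ (97 ≤ d.toNat ∧ d.toNat ≤ 102) := by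
  rw [pvMemOfToNat]
  rw [show ("0123456789abcdef".toList.map Char.toNat) =
    [48,49,50,51,52,53,54,55,56,57,97,98,99,100,101,102] from by decide]
  simp only [List.mem_cons, List.not_mem_nil, or_false]
  omega

lemma pvMemHexUL (d : Char) : d ∈ "0123456789abcdefABCDEF".toList ↔
    (48 ≤ d.toNat ∧ d.toNat ≤ 57) ∨ (97 ≤ d.toNat ∧ d.toNat ≤ 102) ∨
    (65 ≤ d.toNat ∧ d.toNat ≤ 70) := by
  rw [pvMemOfToNat]
  rw [show ("0123456789abcdefABCDEF".toList.map Char.toNat) =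
    [48,49,50,51,52,53,54,55,56,57,97,98,99,100,101,102,65,66,67,68,69,70] from by decide]
  simp only [List.mem_cons, List.not_mem_nil, or_false]
  omega

lemma pvLeToNat (a b : Char) : a ≤ b ↔ a.toNat ≤ b.toNat := by
  rw [Char.le_def]; exact ge_iff_le

-- ## hex/digit bridges

lemma pvLowerHex (c : Char) :
    ("0123456789abcdef".toList.contains (PySem.Chars.lowerChar c)) = pvHexChar c := by
  unfold pvHexChar
  rw [Bool.eq_iff_iff, List.contains_iff_mem, List.contains_iff_mem, pvMemHexL, pvMemHexUL]
  unfold PySem.Chars.lowerChar PySem.Chars.isupper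
  split_ifs with hu
  · have h1 : (65:Nat) ≤ c.toNat := by
      have := (Bool.and_eq_true _ _).mp hu
      have h := of_decide_eq_true this.1
      exact (pvLeToNat 'A' c).mp h
    have h2 : c.toNat ≤ 90 := by
      have := (Bool.and_eq_true _ _).mp hu
      have h := of_decide_eq_true this.2
      exact (pvLeToNat c 'Z').mp h
    have hv : (c.toNat + 32).isValidChar := by unfold Nat.isValidChar; omega
    rw [Char.toNat_ofNat, if_pos hv]
    omega
  · have h1 : ¬ ((65:Nat) ≤ c.toNat ∧ c.toNat ≤ 90) := by
      intro ⟨ha, hb⟩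
      exact hu (by
        rw [Bool.and_eq_true, decide_eq_true_iff, decide_eq_true_iff, pvLeToNat, pvLeToNat]
        exact ⟨ha, hb⟩)
    omega


def pvHexLong (w : List Char) : Bool :=
  w.all pvHexChar && decide ((8 : Int) ≤ (w.length : Int))

lemma pvHexEq (w : List Char) :
    (pv_is_hex_string (String.ofList w) && decide ((8 : Int) ≤ PySem.Str.len (String.ofList w)))
      = pvHexLong w := by
  unfold pv_is_hex_string pvHexLong
  rw [pvStrLen_ofList]
  by_cases hw : w = []
  · subst hw; decide
  · have hne : String.ofList w ≠ "" := by
      intro h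
      exact hw (by simpa using congrArg String.toList h)
    rw [if_neg hne, String.toList_ofList]
    unfold PySem.Chars.lower
    rw [List.all_map]
    have hall : w.all (fun c => "0123456789abcdef".toList.contains (PySem.Chars.lowerChar c))
        = w.all pvHexChar := List.all_congr rfl (fun c => pvLowerHex c)
    simp only [Function.comp_def]
    rw [hall, Bool.and_comm]


-- ## B-side: the scanner state as a function of the current word

def pvPre (w : List Char) : List Char := w.takeWhile (· ≠ ':')
def pvRest (w : List Char) : List Char := w.dropWhile (· ≠ ':')

def pvStateOf (cids : PySem.Set String) (prev : Bool) (w : List Char) : PvB :=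
  ⟨cids, w,
   if pvRest w = [] then none else some ((pvRest w).tail.filter (· ≠ ':')),
   ((pvPre w).length : Int),
   (pvPre w).all PySem.Chars.isdigit,
   w.all pvHexChar,
   (pvRest w).tail.all (fun c => if c = ':' then false else pvHexChar c),
   prev⟩

def pvIsCID (w : List Char) : Bool := decide (PySem.Str.upper (String.ofList w) = "CID")

def pvFlushSet (cids : PySem.Set String) (prev : Bool) (w : List Char) : PySem.Set String :=
  let c1 := pvColonAdd cids (String.ofList w)
  if prev && pvHexLong w then PySem.Set.add c1 (String.ofList w) else c1

lemma pvDecompPreRest (e r : List Char) (h : ':' ∉ e) :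
    pvPre (e ++ ':' :: r) = e ∧ pvRest (e ++ ':' :: r) = ':' :: r := by
  unfold pvPre pvRest
  induction e with
  | nil => simp
  | cons c cs ih =>
    have hc : ¬ c = ':' := fun hh => h (hh ▸ List.mem_cons_self)
    have ih' := ih (fun hm => h (List.mem_cons_of_mem _ hm))
    simp only [List.cons_append, List.takeWhile_cons, List.dropWhile_cons]
    simp only [decide_not, Bool.not_eq_eq_eq_not, Bool.not_true, decide_eq_false_iff_not] at *
    constructor
    · rw [if_pos (by simpa using hc)]
      rw [ih'.1]
    · rw [if_pos (by simpa using hc)]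
      exact ih'.2


lemma pvNoColonPreRest (w : List Char) (h : ':' ∉ w) :
    pvPre w = w ∧ pvRest w = [] := by
  unfold pvPre pvRest
  constructor
  · refine List.takeWhile_eq_self_iff.mpr ?_
    intro c hm
    have hcc : c ≠ ':' := fun hh => h (hh ▸ hm)
    simpa using hcc
  · refine List.dropWhile_eq_nil_iff.mpr ?_
    intro c hm
    have hcc : c ≠ ':' := fun hh => h (hh ▸ hm)
    simpa using hcc


lemma pvFirstColon (l : List Char) (h : ':' ∈ l) : ∃ e r, l = e ++ ':' :: r ∧ ':' ∉ e := by
  induction l with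
  | nil => simp at h
  | cons c cs ih =>
    by_cases hc : c = ':'
    · exact ⟨[], cs, by rw [hc]; rfl, by simp⟩
    · have hm : ':' ∈ cs := by
        rcases List.mem_cons.mp h with h1 | h1
        · exact absurd h1.symm hc
        · exact h1
      rcases ih hm with ⟨e, r, hl, hne⟩
      refine ⟨c :: e, r, by rw [List.cons_append, hl], ?_⟩
      intro hmm
      rcases List.mem_cons.mp hmm with h1 | h1
      · exact hc h1.symm
      · exact hne h1


-- the non-whitespace step advances the word
lemma pvStep_char (cids : PySem.Set String) (prev : Bool) (w : List Char) (c : Char)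
    (hc : PySem.Chars.isspace c = false) :
    pvBStep (pvStateOf cids prev w) c = pvStateOf cids prev (w ++ [c]) := by
  have hrw_all : ∀ (l1 : List Char), (l1 ++ [c]).all pvHexChar = (l1.all pvHexChar && pvHexChar c) := by
    intro l1; simp
  by_cases hw : ':' ∈ w
  · rcases pvFirstColon w hw with ⟨e, r, rfl, he⟩
    obtain ⟨hp, hr⟩ := pvDecompPreRest e r he
    have hassoc : (e ++ ':' :: r) ++ [c] = e ++ ':' :: (r ++ [c]) := by simp
    obtain ⟨hp2, hr2⟩ := pvDecompPreRest e (r ++ [c]) he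
    unfold pvBStep pvStateOf
    rw [if_neg (by simp [hc])]
    simp only [hp, hr, hassoc, hp2, hr2, List.tail_cons, reduceCtorEq, if_false]
    by_cases hcc : c = ':'
    · subst hcc
      simp [List.filter_append, List.all_append, pvHexChar]
    · simp [List.filter_append, List.all_append, hcc, Bool.and_assoc]
  · obtain ⟨hp, hr⟩ := pvNoColonPreRest w hw
    unfold pvBStep pvStateOf
    rw [if_neg (by simp [hc])]
    simp only [hp, hr, List.tail_nil, if_pos]
    by_cases hcc : c = ':'
    · subst hcc
      obtain ⟨hp2, hr2⟩ := pvDecompPreRest w ([] : List Char) hw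
      simp only [hp2, hr2]
      simp [List.all_append]
    · have hw2 : ':' ∉ w ++ [c] := by
        intro hm
        rcases List.mem_append.mp hm with h1 | h1
        · exact hw h1
        · have h2 : ':' = c := by simpa using h1
          exact hcc h2.symm
      obtain ⟨hp2, hr2⟩ := pvNoColonPreRest (w ++ [c]) hw2
      simp [hp2, hr2, List.all_append]
      omega


-- A's per-token colon test, read off the scanner flags
lemma pvColonA_ofList (w : List Char) :
    (match (if pvRest w = [] then none
            else some ((pvRest w).tail.filter (· ≠ ':'))) with
     | some t =>
       if (pvPre w).all PySem.Chars.isdigit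
           && decide ((2 : Int) ≤ ((pvPre w).length : Int))
           && decide (((pvPre w).length : Int) ≤ 5)
           && (pvRest w).tail.all (fun c => if c = ':' then false else pvHexChar c)
           && decide ((8 : Int) ≤ (t.length : Int))
       then some (String.ofList t) else none
     | none => none)
    = pvColonA (String.ofList w) := by
  by_cases hw : ':' ∈ w
  · rcases pvFirstColon w hw with ⟨e, r, rfl, he⟩
    obtain ⟨hp, hr⟩ := pvDecompPreRest e r he
    have hiI : PySem.Str.isIn ":" (String.ofList (e ++ ':' :: r)) = true := by
      rw [pvIsInColon, String.toList_ofList]; exact hw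
    have hsplit : PySem.Str.split? (String.ofList (e ++ ':' :: r)) ":"
        = some ((e :: pvSplit1 r).map String.ofList) := by
      unfold PySem.Str.split? PySem.Chars.split?
      rw [show ((":" : String).toList) = [':'] from rfl]
      rw [if_neg (by simp)]
      rw [String.toList_ofList, pvSplitOn_eq, pvSplit1_append e r he]
      rfl
    simp only [hp, hr, List.tail_cons, reduceCtorEq, if_false]
    unfold pvColonA
    rw [hsplit]
    simp only [hiI, if_true, Option.getD_some]
    by_cases hcr : ':' ∈ r
    · have hlen : ((e :: pvSplit1 r).map String.ofList).length ≠ 2 := by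
        have := pvSplit1_two_of_mem r hcr
        simp only [List.length_map, List.length_cons]
        omega
      rw [if_neg hlen]
      have hf : r.all (fun c => if c = ':' then false else pvHexChar c) = false := by
        exact List.all_eq_false.mpr ⟨':', hcr, by simp⟩
      rw [hf]
      simp
    · rw [pvSplit1_no_colon r hcr]
      simp only [List.map_cons, List.map_nil, List.length_cons, List.length_nil,
        Nat.zero_add, Nat.reduceAdd, if_pos]
      have hfilter : List.filter (fun c => decide (c ≠ ':')) r = r := by
        rw [List.filter_eq_self]
        intro a ha
        simp only [ne_eq, decide_not, Bool.not_eq_eq_eq_not, Bool.not_true,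
          decide_eq_false_iff_not]
        exact fun hh => hcr (hh ▸ ha)
      have hfr : (r.all fun c => if c = ':' then false else pvHexChar c) = r.all pvHexChar := by
        rw [Bool.eq_iff_iff, List.all_eq_true, List.all_eq_true]
        constructor
        · intro h a ha
          have hane : ¬ a = ':' := fun hh => hcr (hh ▸ ha)
          have hia := h a ha
          rwa [if_neg hane] at hia
        · intro h a ha
          have hane : ¬ a = ':' := fun hh => hcr (hh ▸ ha)
          rw [if_neg hane]
          exact h a ha
      have hx : (pv_is_hex_string (String.ofList r) = true ∧ (8 : Int) ≤ PySem.Str.len (String.ofList r))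
          ↔ (r.all pvHexChar = true ∧ (8 : Int) ≤ (r.length : Int)) := by
        have hh := pvHexEq r
        unfold pvHexLong at hh
        rw [Bool.eq_iff_iff] at hh
        simpa [Bool.and_eq_true, decide_eq_true_iff] using hh
      have hd : PySem.Str.strIsdigit (String.ofList e) = true ↔ (e ≠ [] ∧ e.all PySem.Chars.isdigit = true) := by
        simp [PySem.Str.strIsdigit, PySem.Chars.strIsdigit]
      have hcond :
          (PySem.Str.strIsdigit (String.ofList e)
            && decide ((2 : Int) ≤ PySem.Str.len (String.ofList e))
            && decide (PySem.Str.len (String.ofList e) ≤ 5)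
            && pv_is_hex_string (String.ofList r)
            && decide ((8 : Int) ≤ PySem.Str.len (String.ofList r)))
          = (e.all PySem.Chars.isdigit
            && decide ((2 : Int) ≤ ((e.length : Nat) : Int))
            && decide (((e.length : Nat) : Int) ≤ 5)
            && r.all (fun c => if c = ':' then false else pvHexChar c)
            && decide ((8 : Int) ≤ ((r.filter (fun c => decide (c ≠ ':'))).length : Int))) := by
        rw [hfr, hfilter, pvStrLen_ofList]
        rw [Bool.eq_iff_iff]
        simp only [Bool.and_eq_true, decide_eq_true_iff]
        constructor
        · rintro ⟨⟨⟨⟨h1, h2⟩, h3⟩, h4⟩, h5⟩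
          exact ⟨⟨⟨⟨(hd.mp h1).2, h2⟩, h3⟩, hx.mp ⟨h4, h5⟩ |>.1⟩, hx.mp ⟨h4, h5⟩ |>.2⟩
        · rintro ⟨⟨⟨⟨h1, h2⟩, h3⟩, h4⟩, h5⟩
          have hne : e ≠ [] := by
            intro he0
            subst he0
            norm_num at h2
          exact ⟨⟨⟨⟨hd.mpr ⟨hne, h1⟩, h2⟩, h3⟩, hx.mpr ⟨h4, h5⟩ |>.1⟩, hx.mpr ⟨h4, h5⟩ |>.2⟩
      rw [hcond, hfilter]
  · obtain ⟨hp, hr⟩ := pvNoColonPreRest w hw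
    have hiI : PySem.Str.isIn ":" (String.ofList w) = false := by
      rw [← Bool.not_eq_true, pvIsInColon, String.toList_ofList]
      exact hw
    rw [hr]
    simp only [reduceIte]
    unfold pvColonA
    rw [hiI]
    simp


-- the whitespace step on a nonempty word flushes it
lemma pvStep_flush (cids : PySem.Set String) (prev : Bool) (w : List Char) (c : Char)
    (hc : PySem.Chars.isspace c = true) (hw : w ≠ []) :
    pvBStep (pvStateOf cids prev w) c = pvStateOf (pvFlushSet cids prev w) (pvIsCID w) [] := by
  have hwe : w.isEmpty = false := by
    cases w with
    | nil => exact absurd rfl hw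
    | cons a l => rfl
  unfold pvBStep pvFlushSet pvColonAdd pvIsCID
  rw [if_pos hc]
  simp only [pvStateOf, hwe, Bool.false_eq_true, if_false]
  rw [← pvColonA_ofList w]
  simp only [pvHexLong, Bool.and_assoc]
  simp only [pvPre, pvRest, List.takeWhile_nil, List.dropWhile_nil, List.tail_nil,
    List.all_nil, List.length_nil, Nat.cast_zero, reduceIte]
  by_cases hw2 : ':' ∈ w
  · rcases pvFirstColon w hw2 with ⟨e, r, rfl, he⟩
    obtain ⟨hp, hr⟩ := pvDecompPreRest e r he
    unfold pvPre at hp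
    unfold pvRest at hr
    simp only [hp, hr]
    simp only [List.tail_cons, reduceCtorEq, if_false]
    congr 1
    by_cases hCC : (e.all PySem.Chars.isdigit &&
        (decide ((2 : Int) ≤ (e.length : Int)) &&
          (decide ((e.length : Int) ≤ 5) &&
            ((r.all fun c => if c = ':' then false else pvHexChar c) &&
              decide ((8 : Int) ≤ ((List.filter (fun x => decide (x ≠ ':')) r).length : Int)))))) = true
    · simp only [hCC]
      simp
    · rw [Bool.not_eq_true] at hCC
      simp only [hCC]
      simp
  · obtain ⟨hp, hr⟩ := pvNoColonPreRest w hw2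
    unfold pvPre at hp
    unfold pvRest at hr
    simp only [hp, hr]
    simp

-- ## word-level recursion equivalent to the char scan

def pvWordsFold : PySem.Set String → Bool → List (List Char) → PySem.Set String
  | cids, _, [] => cids
  | cids, prev, w :: ws => pvWordsFold (pvFlushSet cids prev w) (pvIsCID w) ws

def pvGoWords : List Char → List Char → List (List Char)
  | [], cur => if cur.isEmpty then [] else [cur.reverse]
  | c :: rest, cur =>
    if PySem.Chars.isspace c then
      (if cur.isEmpty then pvGoWords rest [] else cur.reverse :: pvGoWords rest [])
    else pvGoWords rest (c :: cur)

lemma pvGo_eq (l : List Char) : ∀ (cur : List Char) (acc : List (List Char)),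
    PySem.Chars.split₀.go l cur acc = acc.reverse ++ pvGoWords l cur := by
  induction l with
  | nil =>
    intro cur acc
    show (if cur.isEmpty = true then acc.reverse else (cur.reverse :: acc).reverse) = _
    unfold pvGoWords
    split_ifs <;> simp
  | cons c rest ih =>
    intro cur acc
    show (if PySem.Chars.isspace c = true then
            if cur.isEmpty = true then PySem.Chars.split₀.go rest [] acc
            else PySem.Chars.split₀.go rest [] (cur.reverse :: acc)
          else PySem.Chars.split₀.go rest (c :: cur) acc) = _
    unfold pvGoWords
    by_cases hs : PySem.Chars.isspace c = true
    · rw [if_pos hs, if_pos hs]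
      by_cases he : cur.isEmpty = true
      · rw [if_pos he, if_pos he, ih]
      · rw [if_neg he, if_neg he, ih]
        simp
    · rw [if_neg hs, if_neg hs, ih]


lemma pvFoldB (l : List Char) : ∀ (cids : PySem.Set String) (prev : Bool) (w : List Char),
    (List.foldl pvBStep (pvStateOf cids prev w) (l ++ [' '])).cids
      = pvWordsFold cids prev (pvGoWords l w.reverse) := by
  induction l with
  | nil =>
    intro cids prev w
    simp only [List.nil_append, List.foldl_cons, List.foldl_nil]
    by_cases hw : w = []
    · subst hw
      have hstep : pvBStep (pvStateOf cids prev []) ' ' = pvStateOf cids prev [] := by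
        unfold pvBStep
        rw [if_pos (by decide)]
        simp [pvStateOf]
      rw [hstep]
      rfl
    · rw [pvStep_flush cids prev w ' ' (by decide) hw]
      have hrev : w.reverse.isEmpty = false := by
        simp [hw]
      have hgw : pvGoWords ([] : List Char) w.reverse = [w] := by
        simp only [pvGoWords, hrev, Bool.false_eq_true, if_false, List.reverse_reverse]
      rw [hgw]
      rfl
  | cons c rest ih =>
    intro cids prev w
    simp only [List.cons_append, List.foldl_cons]
    by_cases hs : PySem.Chars.isspace c = true
    · by_cases hw : w = []
      · subst hw
        have hstep : pvBStep (pvStateOf cids prev []) c = pvStateOf cids prev [] := by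
          unfold pvBStep
          rw [if_pos hs]
          simp [pvStateOf]
        rw [hstep, ih cids prev []]
        have hgw : pvGoWords (c :: rest) (([] : List Char).reverse) = pvGoWords rest [] := by
          simp only [pvGoWords, hs, List.reverse_nil, List.isEmpty_nil, if_true]
        rw [hgw, List.reverse_nil]
      · rw [pvStep_flush cids prev w c hs hw, ih (pvFlushSet cids prev w) (pvIsCID w) []]
        have hrev : w.reverse.isEmpty = false := by
          simp [hw]
        have hgw : pvGoWords (c :: rest) w.reverse = w :: pvGoWords rest [] := by
          simp only [pvGoWords, hs, if_true, hrev, Bool.false_eq_true, if_false,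
            List.reverse_reverse]
        rw [hgw]
        have hgw0 : pvGoWords rest (([] : List Char).reverse) = pvGoWords rest [] := by
          rw [List.reverse_nil]
        rw [hgw0]
        rfl
    · have hs' : PySem.Chars.isspace c = false := by rwa [Bool.not_eq_true] at hs
      rw [pvStep_char cids prev w c hs', ih cids prev (w ++ [c])]
      have hgw : pvGoWords (c :: rest) w.reverse = pvGoWords rest (c :: w.reverse) := by
        simp only [pvGoWords, hs', Bool.false_eq_true, if_false]
      rw [hgw, show (w ++ [c]).reverse = c :: w.reverse from by simp]


lemma pvMemFlushSet (cids : PySem.Set String) (prev : Bool) (w : List Char) (x : String) :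
    x ∈ pvFlushSet cids prev w ↔ x ∈ cids ∨ pvColonA (String.ofList w) = some x ∨
      (prev = true ∧ pvHexLong w = true ∧ x = String.ofList w) := by
  unfold pvFlushSet
  by_cases hcond : (prev && pvHexLong w) = true
  · rw [if_pos hcond, PySem.Set.mem_add, pvMemColonAdd]
    rcases Bool.and_eq_true _ _ |>.mp hcond with ⟨hp, hh⟩
    constructor
    · rintro ((h | h) | h)
      · exact Or.inl h
      · exact Or.inr (Or.inl h)
      · exact Or.inr (Or.inr ⟨hp, hh, h⟩)
    · rintro (h | h | ⟨_, _, h⟩)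
      · exact Or.inl (Or.inl h)
      · exact Or.inl (Or.inr h)
      · exact Or.inr h
  · rw [Bool.not_eq_true] at hcond
    rw [hcond]
    simp only [Bool.false_eq_true, if_false, pvMemColonAdd]
    constructor
    · rintro (h | h)
      · exact Or.inl h
      · exact Or.inr (Or.inl h)
    · rintro (h | h | ⟨hp, hh, _⟩)
      · exact Or.inl h
      · exact Or.inr h
      · rw [hp, hh] at hcond; simp at hcond


lemma pvNodupFlushSet (cids : PySem.Set String) (prev : Bool) (w : List Char)
    (h : cids.Nodup) : (pvFlushSet cids prev w).Nodup := by
  unfold pvFlushSet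
  have hca : (pvColonAdd cids (String.ofList w)).Nodup := by
    unfold pvColonAdd
    cases pvColonA (String.ofList w) with
    | none => exact h
    | some c => exact PySem.Set.nodup_add _ _ h
  split_ifs with hc
  · exact PySem.Set.nodup_add _ _ hca
  · exact hca


lemma pvMemWordsFold (ws : List (List Char)) :
    ∀ (cids : PySem.Set String) (prev : Bool) (x : String),
    x ∈ pvWordsFold cids prev ws ↔ x ∈ cids
      ∨ (∃ w ∈ ws, pvColonA (String.ofList w) = some x)
      ∨ (prev = true ∧ ∃ w, ws.head? = some w ∧ pvHexLong w = true ∧ x = String.ofList w)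
      ∨ (∃ p ∈ ws.zip ws.tail, pvIsCID p.1 = true ∧ pvHexLong p.2 = true ∧ x = String.ofList p.2) := by
  induction ws with
  | nil => intro cids prev x; simp [pvWordsFold]
  | cons w rest ih =>
    intro cids prev x
    show x ∈ pvWordsFold (pvFlushSet cids prev w) (pvIsCID w) rest ↔ _
    rw [ih, pvMemFlushSet]
    cases rest with
    | nil => simp
    | cons r0 rest' =>
      simp only [List.head?_cons, List.mem_cons, List.zip_cons_cons, List.tail_cons]
      constructor
      · rintro ((h | h | h) | ⟨w', hw', hc⟩ | ⟨hp, w0, hw0, hh, hx⟩ | ⟨p, hp1, hp2⟩)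
        · exact Or.inl h
        · exact Or.inr (Or.inl ⟨w, Or.inl rfl, h⟩)
        · exact Or.inr (Or.inr (Or.inl ⟨h.1, w, rfl, h.2.1, h.2.2⟩))
        · exact Or.inr (Or.inl ⟨w', Or.inr hw', hc⟩)
        · obtain rfl : r0 = w0 := by injection hw0
          exact Or.inr (Or.inr (Or.inr ⟨(w, r0), Or.inl rfl, hp, hh, hx⟩))
        · exact Or.inr (Or.inr (Or.inr ⟨p, Or.inr hp1, hp2⟩))
      · rintro (h | ⟨w', hw' | hw', hc⟩ | ⟨hp, w0, hw0, hh, hx⟩ | ⟨p, hp1 | hp1, hp2⟩)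
        · exact Or.inl (Or.inl h)
        · exact Or.inl (Or.inr (Or.inl (hw' ▸ hc)))
        · exact Or.inr (Or.inl ⟨w', hw', hc⟩)
        · obtain rfl : w0 = w := by injection hw0 with hh2; exact hh2.symm
          exact Or.inl (Or.inr (Or.inr ⟨hp, hh, hx⟩))
        · subst hp1
          exact Or.inr (Or.inr (Or.inl ⟨hp2.1, r0, rfl, hp2.2.1, hp2.2.2⟩))
        · exact Or.inr (Or.inr (Or.inr ⟨p, hp1, hp2⟩))


lemma pvNodupWordsFold (ws : List (List Char)) : ∀ (cids : PySem.Set String) (prev : Bool),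
    cids.Nodup → (pvWordsFold cids prev ws).Nodup := by
  induction ws with
  | nil => intro cids prev h; exact h
  | cons w rest ih =>
    intro cids prev h
    exact ih _ _ (pvNodupFlushSet cids prev w h)


-- ## pair-condition bridge between the two sides

lemma pvPairA_ofList (w1 w2 : List Char) (x : String) :
    pvPairA (String.ofList w1, String.ofList w2) = some x ↔
      pvIsCID w1 = true ∧ pvHexLong w2 = true ∧ x = String.ofList w2 := by
  unfold pvPairA pvIsCID
  rw [← pvHexEq]
  cases hu : decide (PySem.Str.upper (String.ofList w1) = "CID") <;>
    cases hb : (pv_is_hex_string (String.ofList w2)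
        && decide ((8 : Int) ≤ PySem.Str.len (String.ofList w2))) <;>
      simp [hu, hb, eq_comm]

theorem pv_main (text : String) :
    parse_commitment_refs text = parse_commitment_refs_alt text := by
  by_cases h0 : text = ""
  · subst h0
    decide
  · unfold parse_commitment_refs parse_commitment_refs_alt
    rw [if_neg h0]
    have hA := pvFoldEq (PySem.Str.split₀ text) 0 (PySem.Str.split₀ text) PySem.Set.empty
      (by simp)
    dsimp only at hA ⊢
    rw [show (PySem.List.enumerate (PySem.Str.split₀ text) 0)
        = (PySem.List.enumerate (PySem.Str.split₀ text) ((0 : Nat) : Int)) from by norm_num]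
    rw [hA]
    have hinit : (⟨PySem.Set.empty, [], none, 0, true, true, true, false⟩ : PvB)
        = pvStateOf PySem.Set.empty false [] := rfl
    rw [hinit, pvFoldB text.toList PySem.Set.empty false []]
    rw [show ([] : List Char).reverse = [] from rfl]
    have hws : PySem.Chars.split₀ text.toList = pvGoWords text.toList [] := by
      unfold PySem.Chars.split₀
      rw [pvGo_eq]
      rfl
    set ws := pvGoWords text.toList [] with hwsdef
    have htoks : PySem.Str.split₀ text = ws.map String.ofList := by
      unfold PySem.Str.split₀
      rw [hws]
    rw [htoks]
    apply PySem.List.sorted_eq_sorted_of_perm _ _ _ (fun a b hab => hab)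
    rw [List.perm_ext_iff_of_nodup
      (pvNodupPairFold (ws.map String.ofList) PySem.Set.empty (by simp [PySem.Set.empty]))
      (pvNodupWordsFold ws PySem.Set.empty false (by simp [PySem.Set.empty]))]
    intro x
    rw [pvMemPairFold, pvMemWordsFold]
    have hzip : (ws.map String.ofList).zip (ws.map String.ofList).tail
        = (ws.zip ws.tail).map (Prod.map String.ofList String.ofList) := by
      rw [← List.map_tail, List.zip_map]
    constructor
    · rintro (h | ⟨t, ht, hc⟩ | ⟨p, hp1, hp2⟩)
      · simp [PySem.Set.empty] at h
      · rcases List.mem_map.mp ht with ⟨w0, hw0, rfl⟩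
        exact Or.inr (Or.inl ⟨w0, hw0, hc⟩)
      · rw [hzip] at hp1
        rcases List.mem_map.mp hp1 with ⟨q, hq, rfl⟩
        have := (pvPairA_ofList q.1 q.2 x).mp hp2
        exact Or.inr (Or.inr (Or.inr ⟨q, hq, this⟩))
    · rintro (h | ⟨w0, hw0, hc⟩ | ⟨hp, _, _, _, _⟩ | ⟨q, hq, h1, h2, h3⟩)
      · simp [PySem.Set.empty] at h
      · exact Or.inr (Or.inl ⟨String.ofList w0, List.mem_map_of_mem hw0, hc⟩)
      · exact absurd hp (by simp)
      · refine Or.inr (Or.inr ⟨Prod.map String.ofList String.ofList q, ?_, ?_⟩)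
        · rw [hzip]
          exact List.mem_map_of_mem hq
        · exact (pvPairA_ofList q.1 q.2 x).mpr ⟨h1, h2, h3⟩


-- ===== VERDICT (by name: the statement is the Claim_ definition above) =====
theorem parse_commitment_refs_spec : Claim_equal_parse_commitment_refs := by
  intro text _
  unfold Spec_parse_commitment_refs
  exact pv_main text
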